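-- pv_equiv track=rewrite | github.com/NayemHasanLoLMan/Harry-Potter-AI-Bot | conversational_bot.py | rerank_passages
-- ===== SOURCE A (Python) =====
-- from typing import List, Dict, Any
--
-- def rerank_passages(passages: List[str], query: str) -> List[str]:
--     """Rerank passages based on relevance to query"""
--     query_words = set(query.lower().split())
--
--     # Calculate relevance score for each passage
--     passage_scores = []
--     for passage in passages:
--         # Count keyword matches
--         keyword_matches = sum(1 for word in query_words if word in passage.lower())
--         # Prioritize passages with more query words
--         passage_scores.append((passage, keyword_matches))
--
--     # Sort passages by score (descending)
--     sorted_passages = [p for p, _ in sorted(passage_scores, key=lambda x: x[1], reverse=True)]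
--     return sorted_passages
-- ===== SOURCE B (Python) =====
-- def rerank_passages(passages, query):
--     """Rerank passages based on relevance to query (counting/bucket sort)."""
--     query_words = set(query.lower().split())
--     n = len(query_words)
--     buckets = [[] for _ in range(n + 1)]
--     for passage in passages:
--         low = passage.lower()
--         score = sum(1 for word in query_words if word in low)
--         buckets[score].append(passage)
--     result = []
--     for bucket in reversed(buckets):
--         result.extend(bucket)
--     return result
-- ===== Notes on version B (the rewrite author's own statement) =====
-- stated objective: alternative
-- what changed: Replaces the stable descending comparison sort over (passage, score) pairs by a stable counting sort: passages are distributed into score-indexed buckets in one pass and the buckets are concatenated from highest score down.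
import Mathlib
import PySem

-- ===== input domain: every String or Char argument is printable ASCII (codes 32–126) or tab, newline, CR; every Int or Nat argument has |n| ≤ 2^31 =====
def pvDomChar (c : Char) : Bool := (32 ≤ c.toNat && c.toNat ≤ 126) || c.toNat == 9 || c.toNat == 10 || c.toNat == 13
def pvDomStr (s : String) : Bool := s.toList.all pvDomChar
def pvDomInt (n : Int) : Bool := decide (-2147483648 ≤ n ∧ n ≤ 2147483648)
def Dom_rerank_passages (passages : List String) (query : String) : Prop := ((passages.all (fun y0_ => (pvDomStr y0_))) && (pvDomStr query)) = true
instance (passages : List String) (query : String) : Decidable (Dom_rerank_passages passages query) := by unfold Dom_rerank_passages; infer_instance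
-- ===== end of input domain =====

-- B replaces the comparison sort by a stable counting (bucket) sort keyed by the
-- keyword-match score; objective: alternative (O(n·q) distribution instead of O(n log n) comparisons).

-- shared scoring helper: sum(1 for word in query_words if word in passage.lower())
def pvScore (query_words : List String) (passage : String) : Int :=
  query_words.foldl
    (fun acc word => if PySem.Str.isIn word (PySem.Str.lower passage) then acc + 1 else acc) 0

-- ===== PORT A =====
def rerank_passages (passages : List String) (query : String) : List String :=
  let query_words : PySem.Set String := PySem.Set.ofList (PySem.Str.split₀ (PySem.Str.lower query))
  let passage_scores : List (String × Int) :=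
    passages.foldl (fun acc passage => acc ++ [(passage, pvScore query_words passage)]) []
  (PySem.List.sorted passage_scores (fun x => x.2) true).map (fun x => x.1)

-- ===== PORT B =====
def rerank_passages_alt (passages : List String) (query : String) : List String :=
  let query_words : PySem.Set String := PySem.Set.ofList (PySem.Str.split₀ (PySem.Str.lower query))
  let n := query_words.length
  let buckets : List (List String) :=
    passages.foldl
      (fun bs passage =>
        let s := (pvScore query_words passage).toNat
        bs.set s (bs.getD s [] ++ [passage]))
      (List.replicate (n + 1) [])
  buckets.reverse.foldl (fun acc b => acc ++ b) []

-- ===== PRECONDITION & SPEC =====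
def Spec_rerank_passages (passages : List String) (query : String) (out : List String) : Prop := out = rerank_passages_alt passages query
instance (passages : List String) (query : String) (out : List String) : Decidable (Spec_rerank_passages passages query out) := by unfold Spec_rerank_passages; infer_instance

-- ===== CLAIM (what is proved, stated in full; the proofs are below) =====
def Claim_equal_rerank_passages : Prop := ∀ (passages : List String) (query : String), Dom_rerank_passages passages query → Spec_rerank_passages passages query (rerank_passages passages query)

-- ===== LEMMAS AND PROOFS =====

-- the Nat-valued score
def pvK (qws : List String) (p : String) : Nat :=
  qws.countP (fun w => PySem.Str.isIn w (PySem.Str.lower p))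

theorem pvScore_eq (qws : List String) (p : String) :
    pvScore qws p = ((pvK qws p : Nat) : Int) := by
  simp [pvScore, pvK, PySem.List.foldl_if_add_one]

-- bucketed (descending-by-score, stable) arrangement of a pair list
def pvDF (L : List Int) (ys : List (String × Int)) : List (String × Int) :=
  L.flatMap (fun i => ys.filter (fun x => x.2 == i))

theorem pvDF_nil (L : List Int) : pvDF L [] = [] := by
  simp [pvDF]

theorem pvDF_snd_mem (L : List Int) (ys : List (String × Int)) (z : String × Int)
    (hz : z ∈ pvDF L ys) : z.2 ∈ L := by
  simp only [pvDF, List.mem_flatMap, List.mem_filter, beq_iff_eq] at hz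
  obtain ⟨i, hi, _, he⟩ := hz
  exact he ▸ hi

theorem pvInsertBy_append (before : String × Int → String × Int → Bool) (x : String × Int)
    (as bs : List (String × Int)) (h : ∀ a ∈ as, before x a = false) :
    PySem.List.insertBy before x (as ++ bs) = as ++ PySem.List.insertBy before x bs := by
  induction as with
  | nil => simp
  | cons a as ih =>
    have ha := h a (by simp)
    simp only [List.cons_append, PySem.List.insertBy, ha, Bool.false_eq_true, if_false,
      List.cons.injEq, true_and]
    exact ih (fun a ha => h a (by simp [ha]))

theorem pvInsert_DF (L : List Int) (hL : L.Pairwise (· > ·)) (y : String × Int)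
    (hy : y.2 ∈ L) (ys : List (String × Int)) :
    PySem.List.insertBy (fun a b => decide (b.2 < a.2)) y (pvDF L ys) = pvDF L (ys ++ [y]) := by
  induction L with
  | nil => simp at hy
  | cons i L' ih =>
    have hgt : ∀ j ∈ L', j < i := (List.pairwise_cons.mp hL).1
    have hL' : L'.Pairwise (· > ·) := (List.pairwise_cons.mp hL).2
    have hDFcons : pvDF (i :: L') ys = ys.filter (fun x => x.2 == i) ++ pvDF L' ys := by
      simp [pvDF]
    by_cases hyi : y.2 = i
    · -- y goes to the end of bucket i
      have hskip : ∀ a ∈ ys.filter (fun x => x.2 == i),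
          (fun (a b : String × Int) => decide (b.2 < a.2)) y a = false := by
        intro a ha
        have : a.2 = i := by simpa [beq_iff_eq] using (List.mem_filter.mp ha).2
        simp [this, hyi]
      have hnot : i ∉ L' := fun h => lt_irrefl i (hgt i h)
      have hDF' : pvDF L' (ys ++ [y]) = pvDF L' ys := by
        simp only [pvDF, List.flatMap]
        congr 1
        apply List.map_congr_left
        intro j hj
        have hne : y.2 ≠ j := by rw [hyi]; exact fun h => hnot (h ▸ hj)
        simp [List.filter_append, hne]
      have hins : PySem.List.insertBy (fun (a b : String × Int) => decide (b.2 < a.2)) y (pvDF L' ys)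
          = y :: pvDF L' ys := by
        cases hDL : pvDF L' ys with
        | nil => simp [PySem.List.insertBy]
        | cons z zs =>
          have hz : z.2 ∈ L' := pvDF_snd_mem L' ys z (by simp [hDL])
          have : z.2 < y.2 := hyi ▸ (hgt z.2 hz)
          simp [PySem.List.insertBy, this]
      rw [hDFcons, pvInsertBy_append _ _ _ _ hskip, hins]
      have hrhs : pvDF (i :: L') (ys ++ [y])
          = (ys ++ [y]).filter (fun x => x.2 == i) ++ pvDF L' (ys ++ [y]) := by
        simp [pvDF]
      rw [hrhs, hDF', List.filter_append]
      simp [hyi]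
    · -- y belongs to a lower bucket
      have hyL' : y.2 ∈ L' := by
        cases hy with
        | head => exact absurd rfl hyi
        | tail _ h => exact h
      have hylt : y.2 < i := hgt _ hyL'
      have hskip : ∀ a ∈ ys.filter (fun x => x.2 == i),
          (fun (a b : String × Int) => decide (b.2 < a.2)) y a = false := by
        intro a ha
        have : a.2 = i := by simpa [beq_iff_eq] using (List.mem_filter.mp ha).2
        simp [this]
        omega
      rw [hDFcons, pvInsertBy_append _ _ _ _ hskip, ih hL' hyL']
      have hrhs : pvDF (i :: L') (ys ++ [y])
          = (ys ++ [y]).filter (fun x => x.2 == i) ++ pvDF L' (ys ++ [y]) := by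
        simp [pvDF]
      rw [hrhs, List.filter_append]
      simp [hyi]

theorem pvFoldl_insert_DF (L : List Int) (hL : L.Pairwise (· > ·)) (ys : List (String × Int))
    (hmem : ∀ z ∈ ys, z.2 ∈ L) :
    ys.foldl (fun acc x => PySem.List.insertBy (fun a b => decide ((fun x : String × Int => x.2) b < (fun x : String × Int => x.2) a)) x acc) [] = pvDF L ys := by
  induction ys using List.reverseRecOn with
  | nil => simp [pvDF_nil]
  | append_singleton ys y ih =>
    rw [List.foldl_append, List.foldl_cons, List.foldl_nil]
    rw [ih (fun z hz => hmem z (by simp [hz]))]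
    exact pvInsert_DF L hL y (hmem y (by simp)) ys

theorem pvSorted_DF (L : List Int) (hL : L.Pairwise (· > ·)) (ys : List (String × Int))
    (hmem : ∀ z ∈ ys, z.2 ∈ L) :
    PySem.List.sorted ys (fun x => x.2) true = pvDF L ys := by
  rw [PySem.List.sorted_rev_eq_foldl_insertBy]
  exact pvFoldl_insert_DF L hL ys hmem

-- B's bucket-filling loop computes, per index, the stable filter by score
theorem pvBucket_fold (f : String → Nat) (xs : List String) :
    ∀ (bs : List (List String)), (∀ p ∈ xs, f p < bs.length) →
    xs.foldl (fun bs p => bs.set (f p) (bs.getD (f p) [] ++ [p])) bs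
      = (List.range bs.length).map (fun i => bs.getD i [] ++ xs.filter (fun p => f p == i)) := by
  induction xs with
  | nil =>
    intro bs _
    simp only [List.foldl_nil, List.filter_nil, List.append_nil]
    apply List.ext_getElem (by simp)
    intro j h1 h2
    simp [List.getD_eq_getElem?_getD, List.getElem?_eq_getElem (by simpa using h2)]
  | cons p xs ih =>
    intro bs h
    have hp : f p < bs.length := h p (by simp)
    set bs' := bs.set (f p) (bs.getD (f p) [] ++ [p]) with hbs'
    have hlen : bs'.length = bs.length := by simp [hbs']
    rw [List.foldl_cons]
    rw [ih bs' (by intro q hq; rw [hlen]; exact h q (by simp [hq]))]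
    rw [hlen]
    apply List.map_congr_left
    intro i hi
    have hi' : i < bs.length := by simpa using hi
    by_cases hip : i = f p
    · rw [hip]
      have hset : bs'.getD (f p) [] = bs.getD (f p) [] ++ [p] := by
        rw [hbs', List.getD_eq_getElem _ _ (by simpa using hp), List.getElem_set_self]
      rw [hset]
      simp [List.append_assoc]
    · have hset : bs'.getD i [] = bs.getD i [] := by
        rw [hbs', List.getD_eq_getElem _ _ (by simpa using hi'),
          List.getElem_set_ne (fun h => hip h.symm), List.getD_eq_getElem _ _ hi']
      rw [hset]
      have hne : (f p == i) = false := by simp; exact fun h => hip h.symm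
      simp [hne]

-- the whole equivalence, with the query-word list abstract
theorem pvMain (qws : List String) (passages : List String) :
    (PySem.List.sorted (passages.foldl (fun acc p => acc ++ [(p, pvScore qws p)]) [])
        (fun x => x.2) true).map (fun x => x.1)
      = ((passages.foldl
            (fun bs p =>
              bs.set ((pvScore qws p).toNat) (bs.getD ((pvScore qws p).toNat) [] ++ [p]))
            (List.replicate (qws.length + 1) ([] : List String))).reverse).foldl
          (fun acc b => acc ++ b) [] := by
  have hsc : ∀ p, pvScore qws p = ((pvK qws p : Nat) : Int) := fun p => pvScore_eq qws p
  have hk : ∀ p, pvK qws p < qws.length + 1 := fun p =>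
    Nat.lt_succ_of_le List.countP_le_length
  set n := qws.length with hn
  -- A side
  rw [PySem.List.foldl_append_singleton_eq_map]
  have hrev : ((List.range (n + 1)).reverse).Pairwise (fun a b : Nat => a > b) :=
    List.pairwise_reverse.mpr (by simpa using List.pairwise_lt_range)
  have hLp : (((List.range (n + 1)).reverse).map (fun i : Nat => (i : Int))).Pairwise (· > ·) :=
    hrev.map _ (by intro a b h; exact_mod_cast h)
  have hmem : ∀ z ∈ passages.map (fun p => (p, pvScore qws p)),
      z.2 ∈ ((List.range (n + 1)).reverse).map (fun i : Nat => (i : Int)) := by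
    intro z hz
    obtain ⟨p, hp, rfl⟩ := List.mem_map.mp hz
    refine List.mem_map.mpr ⟨pvK qws p, ?_, (hsc p).symm⟩
    exact List.mem_reverse.mpr (List.mem_range.mpr (hk p))
  rw [List.nil_append, pvSorted_DF _ hLp _ hmem]
  -- B side
  rw [pvBucket_fold (fun p => (pvScore qws p).toNat) passages (List.replicate (n + 1) [])
    (by intro p _; simp only [List.length_replicate]; rw [hsc p]; simpa using hk p)]
  rw [PySem.List.foldl_append_eq_flatten, List.nil_append]
  simp only [List.length_replicate]
  rw [← List.map_reverse]
  rw [pvDF, List.map_flatMap]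
  have hstep : ∀ i : Int,
      ((passages.map (fun p => (p, pvScore qws p))).filter (fun x => x.2 == i)).map (fun x => x.1)
        = passages.filter (fun p => pvScore qws p == i) := by
    intro i
    rw [List.filter_map]
    simp [Function.comp_def]
  simp only [hstep]
  rw [List.flatMap_map, List.flatMap_def]
  congr 1
  apply List.map_congr_left
  intro a ha
  have ha' : a < n + 1 := List.mem_range.mp (List.mem_reverse.mp ha)
  rw [List.getD_replicate _ ha', List.nil_append]
  apply List.filter_congr
  intro p _
  rw [hsc p]
  simp

-- ===== VERDICT (by name: the statement is the Claim_ definition above) =====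
theorem rerank_passages_spec : Claim_equal_rerank_passages := by
  intro passages query _
  unfold Spec_rerank_passages rerank_passages rerank_passages_alt
  dsimp only
  exact pvMain (PySem.Set.ofList (PySem.Str.split₀ (PySem.Str.lower query))) passages
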